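-- pv_equiv track=rewrite | github.com/aglahir1/Advent-of-Code | Advent of Code/2016/11.py | statify
-- ===== SOURCE A (Python) =====
-- def statify(situ: list[list[tuple[str,bool]]], currentStep: int, currentElevator: int) -> tuple[str, int]:
--     state = str(currentElevator)
--     for floor in situ:
--         flstr = []
--         onlyElems = [x[0] for x in floor]
--         counted = []
--         for item in floor:
--             if item[0] in counted:
--                 continue
--             if onlyElems.count(item[0]) == 2:
--                 flstr += 'P'
--             elif item[1]:
--                 flstr += 'G'
--             else:
--                 flstr += 'M'
--             counted.append(item[0])
--         state += ''.join(sorted(flstr)) + ','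
--     return (state, currentStep, currentElevator)
-- ===== SOURCE B (Python) =====
-- def statify(situ: list[list[tuple[str, bool]]], currentStep: int, currentElevator: int) -> tuple[str, int]:
--     parts = [str(currentElevator)]
--     for floor in situ:
--         cnt = {}
--         for name, gen in floor:
--             c, f = cnt.get(name, (0, gen))
--             cnt[name] = (c + 1, f)
--         g = m = p = 0
--         for c, f in cnt.values():
--             if c == 2:
--                 p += 1
--             elif f:
--                 g += 1
--             else:
--                 m += 1
--         parts.append('G' * g + 'M' * m + 'P' * p + ',')
--     return (''.join(parts), currentStep, currentElevator)
-- ===== Notes on version B (the rewrite author's own statement) =====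
-- stated objective: alternative
-- what changed: B eliminates A's sort and quadratic scans entirely: one pass folds each floor into per-name (count, first-flag) pairs, a second pass tallies three counters g/m/p, and the floor string is emitted directly as 'G'*g+'M'*m+'P'*p (a counting-sort style construction), instead of A's per-item membership/count scans followed by sorting a char list.
import Mathlib
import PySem

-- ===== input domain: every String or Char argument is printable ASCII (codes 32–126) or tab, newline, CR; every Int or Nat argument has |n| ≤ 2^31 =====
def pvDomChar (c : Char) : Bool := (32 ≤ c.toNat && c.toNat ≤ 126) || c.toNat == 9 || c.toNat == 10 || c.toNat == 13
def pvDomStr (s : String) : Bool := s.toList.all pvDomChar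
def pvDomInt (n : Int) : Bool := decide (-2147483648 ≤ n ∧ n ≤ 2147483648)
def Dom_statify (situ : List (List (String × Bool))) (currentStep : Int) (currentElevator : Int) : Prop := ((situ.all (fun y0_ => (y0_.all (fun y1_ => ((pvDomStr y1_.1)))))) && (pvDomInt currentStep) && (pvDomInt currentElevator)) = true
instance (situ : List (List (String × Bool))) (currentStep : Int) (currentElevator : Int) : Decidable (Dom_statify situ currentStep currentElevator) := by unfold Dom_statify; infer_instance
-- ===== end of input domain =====

-- B removes A's sort and per-item membership/.count scans: one pass builds per-name
-- (count, first-flag) pairs, a tally pass yields g/m/p, and the floor string is emitted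
-- directly as 'G'*g+'M'*m+'P'*p (counting-sort style); same output, different algorithm.


-- ===== PORT A =====
def statify (situ : List (List (String × Bool))) (currentStep : Int) (currentElevator : Int) : String × Int × Int :=
  let state := situ.foldl (fun state floor =>
    let onlyElems := floor.map (fun x => x.1)
    let fc := floor.foldl (fun (acc : List Char × List String) item =>
      if acc.2.contains item.1 then acc
      else
        (acc.1 ++ (if PySem.List.count onlyElems item.1 == 2 then ['P']
                   else if item.2 then ['G'] else ['M']),
         acc.2 ++ [item.1])) ([], [])
    state ++ String.ofList (PySem.List.sorted fc.1 (fun c => c)) ++ ",")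
    (PySem.Int.toStr currentElevator)
  (state, currentStep, currentElevator)

-- ===== PORT B =====
def statify_alt (situ : List (List (String × Bool))) (currentStep : Int) (currentElevator : Int) : String × Int × Int :=
  let state := situ.foldl (fun state floor =>
    let cnt := floor.foldl (fun (d : PySem.Dict String (Int × Bool)) it =>
      let cf := d.getD it.1 (0, it.2)
      d.insert it.1 (cf.1 + 1, cf.2)) PySem.Dict.empty
    let gmp := cnt.values.foldl (fun (a : Nat × Nat × Nat) cf =>
      if cf.1 == 2 then (a.1, a.2.1, a.2.2 + 1)
      else if cf.2 then (a.1 + 1, a.2.1, a.2.2)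
      else (a.1, a.2.1 + 1, a.2.2)) (0, 0, 0)
    state ++ String.ofList (List.replicate gmp.1 'G' ++ List.replicate gmp.2.1 'M' ++ List.replicate gmp.2.2 'P') ++ ",")
    (PySem.Int.toStr currentElevator)
  (state, currentStep, currentElevator)

-- ===== PRECONDITION & SPEC =====
def Spec_statify (situ : List (List (String × Bool))) (currentStep : Int) (currentElevator : Int) (out : String × Int × Int) : Prop := out = statify_alt situ currentStep currentElevator
instance (situ : List (List (String × Bool))) (currentStep : Int) (currentElevator : Int) (out : String × Int × Int) : Decidable (Spec_statify situ currentStep currentElevator out) := by unfold Spec_statify; infer_instance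

-- ===== CLAIM (what is proved, stated in full; the proofs are below) =====
def Claim_equal_statify : Prop := ∀ (situ : List (List (String × Bool))) (currentStep : Int) (currentElevator : Int), Dom_statify situ currentStep currentElevator → Spec_statify situ currentStep currentElevator (statify situ currentStep currentElevator)

-- ===== LEMMAS AND PROOFS =====

/-- first-occurrence names of `l` that are not yet in `seen`, in order. -/
def pvFK : List (String × Bool) → List String → List String
  | [], _ => []
  | it :: rest, seen =>
    if seen.contains it.1 then pvFK rest seen else it.1 :: pvFK rest (seen ++ [it.1])

theorem pvFK_not_mem (l : List (String × Bool)) (seen : List String) :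
    ∀ k ∈ pvFK l seen, k ∉ seen := by
  induction l generalizing seen with
  | nil => simp [pvFK]
  | cons it rest ih =>
    intro k hk
    by_cases h : seen.contains it.1
    · simp only [pvFK, h, if_true] at hk
      exact ih seen k hk
    · simp only [pvFK, h, Bool.false_eq_true, if_false, List.mem_cons] at hk
      rcases hk with rfl | hk
      · simpa using h
      · intro hc
        exact ih (seen ++ [it.1]) k hk (List.mem_append_left _ hc)

theorem pvSet_update_eq (l : List (String × Bool)) (seen : List String) :
    PySem.Set.update seen (l.map (fun x => x.1)) = seen ++ pvFK l seen := by
  induction l generalizing seen with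
  | nil => simp [PySem.Set.update, pvFK]
  | cons it rest ih =>
    have hcs : PySem.Set.contains seen it.1 = seen.contains it.1 := rfl
    by_cases hm : it.1 ∈ seen
    · have h : seen.contains it.1 = true := List.contains_iff_mem.mpr hm
      simpa [PySem.Set.update, PySem.Set.add, pvFK, hcs, h, hm] using ih seen
    · have h : seen.contains it.1 = false := by simpa using hm
      have hrec := ih (seen ++ [it.1])
      simp only [PySem.Set.update, List.map_cons, List.foldl_cons, PySem.Set.add, hcs, h,
        Bool.false_eq_true, if_false, pvFK] at hrec ⊢
      rw [hrec]
      simp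

theorem pvA_fold (names : List String) (l : List (String × Bool)) (fl : List Char)
    (seen : List String) :
    (l.foldl (fun (acc : List Char × List String) item =>
        if acc.2.contains item.1 then acc
        else
          (acc.1 ++ (if PySem.List.count names item.1 == 2 then ['P']
                     else if item.2 then ['G'] else ['M']),
           acc.2 ++ [item.1])) (fl, seen)).1
      = fl ++ (pvFK l seen).map (fun k =>
          if PySem.List.count names k == 2 then 'P'
          else if ((l.filter (fun it => it.1 == k)).map (fun it => it.2)).headD false then 'G'
          else 'M') := by
  induction l generalizing fl seen with
  | nil => simp [pvFK]
  | cons it rest ih =>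
    by_cases h : seen.contains it.1
    · simp only [List.foldl_cons, h, if_true, pvFK]
      rw [ih fl seen]
      congr 1
      apply List.map_congr_left
      intro k hk
      have hne : (it.1 == k) = false := by
        simp only [beq_eq_false_iff_ne, ne_eq]
        rintro rfl
        exact pvFK_not_mem rest seen _ hk (List.contains_iff_mem.mp h)
      simp [hne]
    · simp only [List.foldl_cons, h, Bool.false_eq_true, if_false, pvFK]
      rw [ih]
      rw [List.map_cons]
      have hhead :
          (if PySem.List.count names it.1 == 2 then 'P'
           else if (((it :: rest).filter (fun x => x.1 == it.1)).map (fun x => x.2)).headD false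
                then 'G' else 'M')
          = (if PySem.List.count names it.1 == 2 then 'P' else if it.2 then 'G' else 'M') := by
        simp
      rw [hhead]
      have htail : (pvFK rest (seen ++ [it.1])).map (fun k =>
            if PySem.List.count names k == 2 then 'P'
            else if ((rest.filter (fun x => x.1 == k)).map (fun x => x.2)).headD false then 'G'
            else 'M')
          = (pvFK rest (seen ++ [it.1])).map (fun k =>
            if PySem.List.count names k == 2 then 'P'
            else if (((it :: rest).filter (fun x => x.1 == k)).map (fun x => x.2)).headD false
                 then 'G' else 'M') := by
        apply List.map_congr_left
        intro k hk
        have hne : (it.1 == k) = false := by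
          simp only [beq_eq_false_iff_ne, ne_eq]
          rintro rfl
          exact pvFK_not_mem rest (seen ++ [it.1]) _ hk (by simp)
        simp [hne]
      rw [htail]
      cases hc : PySem.List.count names it.1 == 2 <;> cases hb : it.2 <;>
        simp

theorem pvItems_eq {ν : Type} (v0 : ν) (items : List (String × ν))
    (h : (items.map (fun x => x.1)).Nodup) :
    items = (items.map (fun x => x.1)).map
      (fun k => (k, (PySem.Dict.mk items).getD k v0)) := by
  induction items with
  | nil => rfl
  | cons p rest ih =>
    obtain ⟨k, v⟩ := p
    simp only [List.map_cons, List.nodup_cons] at h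
    simp only [List.map_cons, List.cons.injEq]
    refine ⟨?_, ?_⟩
    · simp [PySem.Dict.getD, PySem.Dict.get?_mk_cons]
    · have hstep : (rest.map (fun x => x.1)).map
            (fun k' => (k', (PySem.Dict.mk ((k, v) :: rest)).getD k' v0))
          = (rest.map (fun x => x.1)).map
            (fun k' => (k', (PySem.Dict.mk rest).getD k' v0)) := by
        apply List.map_congr_left
        intro k' hk'
        have hne : (k == k') = false := by
          simp only [beq_eq_false_iff_ne, ne_eq]
          rintro rfl; exact h.1 hk'
        simp [PySem.Dict.getD, PySem.Dict.get?_mk_cons, hne]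
      rw [hstep]
      exact ih h.2

/-- one fused step of B's counting dict on the occurrence list of a single key -/
def pvStepOpt : Option (Int × Bool) → List (String × Bool) → Option (Int × Bool)
  | o, occ => occ.foldl (fun o it =>
      match o with
      | some cf => some (cf.1 + 1, cf.2)
      | none => some (1, it.2)) o

theorem pvGet_cnt (l : List (String × Bool)) (d : PySem.Dict String (Int × Bool)) (k : String) :
    (l.foldl (fun (d : PySem.Dict String (Int × Bool)) it =>
        let cf := d.getD it.1 (0, it.2)
        d.insert it.1 (cf.1 + 1, cf.2)) d).get? k
      = pvStepOpt (d.get? k) (l.filter (fun it => it.1 == k)) := by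
  induction l generalizing d with
  | nil => simp [pvStepOpt]
  | cons it rest ih =>
    simp only [List.foldl_cons, List.filter_cons]
    rw [ih]
    by_cases h : it.1 = k
    · subst h
      have hg : ((d.insert it.1
            ((d.getD it.1 (0, it.2)).1 + 1, (d.getD it.1 (0, it.2)).2)).get? it.1)
          = some ((d.getD it.1 (0, it.2)).1 + 1, (d.getD it.1 (0, it.2)).2) :=
        PySem.Dict.get?_insert_self _ _ _
      simp only [beq_self_eq_true, if_true, pvStepOpt, List.foldl_cons]
      rw [hg]
      cases hd : d.get? it.1 with
      | none => simp [PySem.Dict.getD_eq_get?_getD, hd]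
      | some cf => simp [PySem.Dict.getD_eq_get?_getD, hd]
    · have h' : (it.1 == k) = false := by simpa using h
      have hg : ((d.insert it.1
            ((d.getD it.1 (0, it.2)).1 + 1, (d.getD it.1 (0, it.2)).2)).get? k)
          = d.get? k := PySem.Dict.get?_insert_of_ne _ _ (Ne.symm h)
      simp only [h', Bool.false_eq_true, if_false]
      rw [hg]

theorem pvStepOpt_some (occ : List (String × Bool)) (c : Int) (f : Bool) :
    pvStepOpt (some (c, f)) occ = some (c + occ.length, f) := by
  induction occ generalizing c with
  | nil => simp [pvStepOpt]
  | cons o os ih =>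
    simp only [pvStepOpt, List.foldl_cons] at ih ⊢
    rw [ih]
    simp only [List.length_cons]
    congr 2
    push_cast
    ring

theorem pvStepOpt_none (o : String × Bool) (os : List (String × Bool)) :
    pvStepOpt none (o :: os) = some ((1 : Int) + os.length, o.2) := by
  simp only [pvStepOpt, List.foldl_cons]
  exact pvStepOpt_some os 1 o.2

/-- B's tally loop counts the three classes. -/
theorem pvGMP (vs : List (Int × Bool)) (g m p : Nat) :
    vs.foldl (fun (a : Nat × Nat × Nat) cf =>
        if cf.1 == 2 then (a.1, a.2.1, a.2.2 + 1)
        else if cf.2 then (a.1 + 1, a.2.1, a.2.2)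
        else (a.1, a.2.1 + 1, a.2.2)) (g, m, p)
      = (g + vs.countP (fun cf => !(cf.1 == 2) && cf.2),
         m + vs.countP (fun cf => !(cf.1 == 2) && !cf.2),
         p + vs.countP (fun cf => cf.1 == 2)) := by
  induction vs generalizing g m p with
  | nil => simp
  | cons cf rest ih =>
    obtain ⟨c, f⟩ := cf
    simp only [List.foldl_cons, List.countP_cons]
    by_cases hc : (c == 2) = true
    · simp only [hc, if_true, ih, Bool.not_true, Bool.false_and]
      simp [Prod.mk.injEq]
      omega
    · have hc' : (c == 2) = false := by simpa using hc
      cases f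
      · simp only [hc', Bool.false_eq_true, if_false, ih, Bool.not_false, Bool.true_and,
          Bool.and_false]
        simp [Prod.mk.injEq]
        omega
      · simp only [hc', Bool.false_eq_true, if_false, if_true, ih, Bool.not_false,
          Bool.and_true]
        simp [Prod.mk.injEq]
        omega

/-- counting-sort identity for lists over the three letters G < M < P -/
theorem pvSortGMP (l : List Char) (h : ∀ c ∈ l, c = 'G' ∨ c = 'M' ∨ c = 'P') :
    PySem.List.sorted l (fun c => c) false
      = List.replicate (l.count 'G') 'G' ++ List.replicate (l.count 'M') 'M'
        ++ List.replicate (l.count 'P') 'P' := by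
  apply PySem.List.sorted_id_eq_of_perm_of_pairwise
  · rw [List.perm_iff_count]
    intro c
    simp only [List.count_append, List.count_replicate]
    by_cases hg : c = 'G'
    · subst hg; simp
    · by_cases hm : c = 'M'
      · subst hm; simp
      · by_cases hp : c = 'P'
        · subst hp; simp
        · have h0 : l.count c = 0 := by
            apply List.count_eq_zero.mpr
            intro hmem
            rcases h c hmem with rfl | rfl | rfl <;> simp_all
          simp [h0]
          refine ⟨⟨fun h' => absurd h'.symm hg, fun h' => absurd h'.symm hm⟩,
            fun h' => absurd h'.symm hp⟩
  · refine List.pairwise_append.mpr ⟨List.pairwise_append.mpr ⟨?_, ?_, ?_⟩, ?_, ?_⟩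
    · apply List.pairwise_replicate.mpr; exact Or.inr (le_refl _)
    · apply List.pairwise_replicate.mpr; exact Or.inr (le_refl _)
    · intro a ha b hb
      rw [List.eq_of_mem_replicate ha, List.eq_of_mem_replicate hb]
      decide
    · apply List.pairwise_replicate.mpr; exact Or.inr (le_refl _)
    · intro a ha b hb
      rw [List.eq_of_mem_replicate hb]
      rcases List.mem_append.mp ha with ha | ha <;> rw [List.eq_of_mem_replicate ha] <;> decide

theorem pvFoldl_congr {α β : Type} (f g : α → β → α) (h : ∀ a b, f a b = g a b)
    (l : List β) (a : α) : l.foldl f a = l.foldl g a := by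
  induction l generalizing a with
  | nil => rfl
  | cons x xs ih => simp only [List.foldl_cons, h]; exact ih _

/-- per-floor agreement: A's sorted char list equals B's replicate blocks -/
theorem pvFloor_eq (floor : List (String × Bool)) :
    (let onlyElems := floor.map (fun x => x.1)
     let fc := floor.foldl (fun (acc : List Char × List String) item =>
       if acc.2.contains item.1 then acc
       else
         (acc.1 ++ (if PySem.List.count onlyElems item.1 == 2 then ['P']
                    else if item.2 then ['G'] else ['M']),
          acc.2 ++ [item.1])) ([], [])
     PySem.List.sorted fc.1 (fun c => c))
    =
    (let cnt := floor.foldl (fun (d : PySem.Dict String (Int × Bool)) it =>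
       let cf := d.getD it.1 (0, it.2)
       d.insert it.1 (cf.1 + 1, cf.2)) PySem.Dict.empty
     let gmp := cnt.values.foldl (fun (a : Nat × Nat × Nat) cf =>
       if cf.1 == 2 then (a.1, a.2.1, a.2.2 + 1)
       else if cf.2 then (a.1 + 1, a.2.1, a.2.2)
       else (a.1, a.2.1 + 1, a.2.2)) (0, 0, 0)
     List.replicate gmp.1 'G' ++ List.replicate gmp.2.1 'M' ++ List.replicate gmp.2.2 'P') := by
  set names := floor.map (fun x => x.1) with hnames
  -- the classifying function shared by both sides, on keys
  set clsA : String → Char := fun k =>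
    if PySem.List.count names k == 2 then 'P'
    else if ((floor.filter (fun it => it.1 == k)).map (fun it => it.2)).headD false then 'G'
    else 'M' with hclsA
  set G := floor.foldl (fun (d : PySem.Dict String (Int × Bool)) it =>
      let cf := d.getD it.1 (0, it.2)
      d.insert it.1 (cf.1 + 1, cf.2)) PySem.Dict.empty with hG
  have hkeys : G.keys = pvFK floor [] := by
    rw [hG, PySem.Dict.keys_foldl_insert_key floor (fun x => x.1)
      (fun d it => ((d.getD it.1 (0, it.2)).1 + 1, (d.getD it.1 (0, it.2)).2)) PySem.Dict.empty]
    have : (PySem.Dict.empty : PySem.Dict String (Int × Bool)).keys = ([] : List String) := rfl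
    rw [this]
    simpa using pvSet_update_eq floor []
  have hnodup : G.keys.Nodup := by
    rw [hG]
    exact PySem.Dict.nodup_keys_foldl_insert_key floor (fun x => x.1)
      (fun d it => ((d.getD it.1 (0, it.2)).1 + 1, (d.getD it.1 (0, it.2)).2)) PySem.Dict.empty
      (by simp [PySem.Dict.keys, PySem.Dict.empty])
  -- B's value at a key present in the dict
  have hval : ∀ k ∈ G.keys, G.getD k (0, false)
      = (((floor.filter (fun it => it.1 == k)).length : Int),
         ((floor.filter (fun it => it.1 == k)).map (fun it => it.2)).headD false) := by
    intro k hk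
    have hget : G.get? k = pvStepOpt ((PySem.Dict.empty : PySem.Dict String (Int × Bool)).get? k)
        (floor.filter (fun it => it.1 == k)) := by
      rw [hG]; exact pvGet_cnt floor PySem.Dict.empty k
    rw [PySem.Dict.get?_empty] at hget
    cases hocc : floor.filter (fun it => it.1 == k) with
    | nil =>
      exfalso
      -- k ∈ keys means k occurs in floor, so the filter is nonempty
      have hkmem : k ∈ pvFK floor [] := hkeys ▸ hk
      have : k ∈ names := by
        -- pvFK produces only names of floor
        clear hget hocc
        have : ∀ (l : List (String × Bool)) (seen : List String), k ∈ pvFK l seen →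
            k ∈ l.map (fun x => x.1) := by
          intro l
          induction l with
          | nil => intro seen h; simp [pvFK] at h
          | cons it rest ih =>
            intro seen h
            by_cases hc : seen.contains it.1
            · simp only [pvFK, hc, if_true] at h
              exact List.mem_cons_of_mem _ (ih _ h)
            · simp only [pvFK, hc, Bool.false_eq_true, if_false, List.mem_cons] at h
              rcases h with rfl | h
              · simp
              · exact List.mem_cons_of_mem _ (ih _ h)
        exact this floor [] hkmem
      rw [hnames] at this
      obtain ⟨it, hit, hitk⟩ := List.mem_map.mp this
      have : it ∈ floor.filter (fun it => it.1 == k) :=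
        List.mem_filter.mpr ⟨hit, by simp [hitk]⟩
      simp [hocc] at this
    | cons o os =>
      rw [hocc, pvStepOpt_none] at hget
      rw [PySem.Dict.getD_eq_get?_getD, hget]
      simp only [Option.getD_some, List.length_cons, List.map_cons, List.headD_cons,
        Prod.mk.injEq]
      refine ⟨by push_cast; ring, trivial⟩
  -- B's values list is the classified keys, pre-classification
  have hitems : G.items = G.keys.map (fun k => (k, G.getD k (0, false))) := by
    exact pvItems_eq (0, false) G.items hnodup
  have hcount : ∀ k, PySem.List.count names k = (floor.filter (fun it => it.1 == k)).length := by
    intro k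
    simp [hnames, PySem.List.count, List.count_eq_countP, List.countP_eq_length_filter,
      List.filter_map, Function.comp_def]
  -- value classified by B's tally predicate = clsA
  have hcls : ∀ k ∈ G.keys,
      ((if (G.getD k (0, false)).1 == 2 then 'P'
        else if (G.getD k (0, false)).2 then 'G' else 'M') = clsA k) := by
    intro k hk
    rw [hval k hk, hclsA]
    have h2 : ((((floor.filter (fun it => it.1 == k)).length : Int)) == 2)
        = (PySem.List.count names k == 2) := by
      rw [hcount k]
      cases hl : (floor.filter (fun it => it.1 == k)).length == 2
      · simp only [beq_eq_false_iff_ne] at hl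
        simp only [beq_eq_false_iff_ne]
        omega
      · simp only [beq_iff_eq] at hl
        simp [hl]
    simp only [h2]
  -- A's unsorted char list
  have hA : (floor.foldl (fun (acc : List Char × List String) item =>
      if acc.2.contains item.1 then acc
      else
        (acc.1 ++ (if PySem.List.count names item.1 == 2 then ['P']
                   else if item.2 then ['G'] else ['M']),
         acc.2 ++ [item.1])) ([], [])).1 = (pvFK floor []).map clsA := by
    rw [pvA_fold names floor [] []]
    simp [hclsA]
  show PySem.List.sorted (floor.foldl _ ([], [])).1 (fun c => c) = _
  rw [hA]
  -- B's values mapped through the tally classes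
  have hvalues : G.values = G.keys.map (fun k => G.getD k (0, false)) := by
    show G.items.map (fun p => p.2) = _
    rw [hitems, List.map_map]
    rfl
  have hcntG : ((pvFK floor []).map clsA).count 'G'
      = G.values.countP (fun cf => !(cf.1 == 2) && cf.2) := by
    rw [hvalues, ← hkeys, List.count_eq_countP, List.countP_map, List.countP_map]
    apply List.countP_congr
    intro k hk
    have := hcls k hk
    simp only [Function.comp_def]
    cases h2 : (G.getD k (0, false)).1 == 2 <;> cases hb : (G.getD k (0, false)).2 <;>
      simp [h2, hb] at this ⊢ <;> simp [← this]
  have hcntM : ((pvFK floor []).map clsA).count 'M'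
      = G.values.countP (fun cf => !(cf.1 == 2) && !cf.2) := by
    rw [hvalues, ← hkeys, List.count_eq_countP, List.countP_map, List.countP_map]
    apply List.countP_congr
    intro k hk
    have := hcls k hk
    simp only [Function.comp_def]
    cases h2 : (G.getD k (0, false)).1 == 2 <;> cases hb : (G.getD k (0, false)).2 <;>
      simp [h2, hb] at this ⊢ <;> simp [← this]
  have hcntP : ((pvFK floor []).map clsA).count 'P'
      = G.values.countP (fun cf => cf.1 == 2) := by
    rw [hvalues, ← hkeys, List.count_eq_countP, List.countP_map, List.countP_map]
    apply List.countP_congr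
    intro k hk
    have := hcls k hk
    simp only [Function.comp_def]
    cases h2 : (G.getD k (0, false)).1 == 2 <;> cases hb : (G.getD k (0, false)).2 <;>
      simp [h2, hb] at this ⊢ <;> simp [← this]
  rw [pvSortGMP]
  · simp only [pvGMP, Nat.zero_add]
    rw [hcntG, hcntM, hcntP]
  · intro c hc
    obtain ⟨k, _, rfl⟩ := List.mem_map.mp hc
    simp only [hclsA]
    split_ifs <;> simp

-- ===== VERDICT (by name: the statement is the Claim_ definition above) =====
theorem statify_spec : Claim_equal_statify := by
  intro situ currentStep currentElevator _
  show statify situ currentStep currentElevator = statify_alt situ currentStep currentElevator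
  simp only [statify, statify_alt]
  refine congrArg (fun s => (s, currentStep, currentElevator)) ?_
  apply pvFoldl_congr
  intro state floor
  have := pvFloor_eq floor
  simp only at this
  rw [this]
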